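-- pv_equiv track=rewrite | github.com/walehn/ureter_stone | src/bootstrap.py | aggregate_to_patient_level
-- ===== SOURCE A (Python) =====
-- from typing import Dict, List, Tuple, Optional
--
-- def aggregate_to_patient_level(data: List[Dict]) -> List[Dict]:
--     """
--     병변 레벨을 환자 레벨로 집계
--
--     환자에 병변이 하나라도 있으면 positive (max aggregation)
--
--     Args:
--         data: 레코드 리스트
--
--     Returns:
--         환자 레벨 레코드 리스트
--     """
--     patient_agg = {}
--
--     for record in data:
--         patient_id = record['patient_id']
--
--         if patient_id not in patient_agg:
--             patient_agg[patient_id] = {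
--                 'patient_id': patient_id,
--                 'ground_truth': record['ground_truth'],
--                 'prediction': record['prediction']
--             }
--         else:
--             # Max aggregation (any positive = positive)
--             patient_agg[patient_id]['ground_truth'] = max(
--                 patient_agg[patient_id]['ground_truth'],
--                 record['ground_truth']
--             )
--             patient_agg[patient_id]['prediction'] = max(
--                 patient_agg[patient_id]['prediction'],
--                 record['prediction']
--             )
--
--     return list(patient_agg.values())
-- ===== SOURCE B (Python) =====
-- def aggregate_to_patient_level(data):
--     # Pass 1: group ground_truth / prediction values per patient, first-appearance order.
--     groups = {}
--     for record in data:
--         gts, preds = groups.setdefault(record['patient_id'], ([], []))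
--         gts.append(record['ground_truth'])
--         preds.append(record['prediction'])
--     # Pass 2: reduce each group with max.
--     return [
--         {'patient_id': pid, 'ground_truth': max(gts), 'prediction': max(preds)}
--         for pid, (gts, preds) in groups.items()
--     ]
-- ===== Notes on version B (the rewrite author's own statement) =====
-- stated objective: alternative
-- what changed: A keeps one running-max record per patient updated in a single pass; B first builds an ordered group-by dict of per-patient value lists and then, in a separate pass, reduces each group with max().
import Mathlib
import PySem

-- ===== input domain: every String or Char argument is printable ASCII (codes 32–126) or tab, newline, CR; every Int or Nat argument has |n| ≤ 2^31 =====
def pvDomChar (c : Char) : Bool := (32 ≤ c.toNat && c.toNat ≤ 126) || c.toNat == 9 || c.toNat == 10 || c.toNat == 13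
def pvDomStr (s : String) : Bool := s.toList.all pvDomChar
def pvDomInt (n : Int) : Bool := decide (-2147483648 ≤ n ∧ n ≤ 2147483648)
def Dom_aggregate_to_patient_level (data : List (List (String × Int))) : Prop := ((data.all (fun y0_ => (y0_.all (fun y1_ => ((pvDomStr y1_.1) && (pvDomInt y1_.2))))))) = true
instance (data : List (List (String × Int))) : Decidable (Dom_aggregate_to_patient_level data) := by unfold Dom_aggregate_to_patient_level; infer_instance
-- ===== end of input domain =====

-- B replaces A's single-pass running-max aggregation by an explicit group-by
-- (patient_id → lists of values) followed by a separate max-reduce pass; same cost,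
-- different decomposition. Equality of RETURN values is what is proved.

-- record[k] : first-match lookup in a Python dict rendered as an association list
def pvGetKey (r : List (String × Int)) (k : String) : Option Int :=
  match r with
  | [] => none
  | (k', v) :: t => if k' == k then some v else pvGetKey t k

-- ===== PORT A =====
-- A's running record for one patient: {'patient_id': pid, 'ground_truth': g, 'prediction': p}
-- (the getD 0 defaults are unreachable inside Pre_, where every record has all three keys)
def aggregate_to_patient_level (data : List (List (String × Int))) : List (List (String × Int)) :=
  let agg := data.foldl
    (fun (agg : PySem.Dict Int (PySem.Dict String Int)) record =>
      let pid := (pvGetKey record "patient_id").getD 0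
      if !(agg.contains pid) then
        agg.insert pid
          (((PySem.Dict.empty.insert "patient_id" pid).insert
              "ground_truth" ((pvGetKey record "ground_truth").getD 0)).insert
              "prediction" ((pvGetKey record "prediction").getD 0))
      else
        let agg := agg.modify pid PySem.Dict.empty
          (fun inner => inner.insert "ground_truth"
            (max (inner.getD "ground_truth" 0) ((pvGetKey record "ground_truth").getD 0)))
        agg.modify pid PySem.Dict.empty
          (fun inner => inner.insert "prediction"
            (max (inner.getD "prediction" 0) ((pvGetKey record "prediction").getD 0))))
    PySem.Dict.empty
  agg.values.map (fun d => d.items)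

-- ===== PORT B =====
-- max(l) for a nonempty Python int list (the [] case is unreachable: groups are never empty)
def pvMaxList (l : List Int) : Int :=
  match l with
  | [] => 0
  | h :: t => t.foldl max h

def aggregate_to_patient_level_alt (data : List (List (String × Int))) : List (List (String × Int)) :=
  let groups := data.foldl
    (fun (groups : PySem.Dict Int (List Int × List Int)) record =>
      let pid := (pvGetKey record "patient_id").getD 0
      let groups := groups.setdefault pid ([], [])
      let cur := groups.getD pid ([], [])
      groups.insert pid
        (cur.1 ++ [(pvGetKey record "ground_truth").getD 0],
         cur.2 ++ [(pvGetKey record "prediction").getD 0]))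
    PySem.Dict.empty
  groups.items.map (fun p =>
    [("patient_id", p.1), ("ground_truth", pvMaxList p.2.1), ("prediction", pvMaxList p.2.2)])

-- ===== PRECONDITION & SPEC =====
-- Pre_ excludes exactly the inputs where some record lacks one of the keys
-- 'patient_id'/'ground_truth'/'prediction': there the Python A raises KeyError.
def Pre_aggregate_to_patient_level (data : List (List (String × Int))) : Prop :=
  ∀ r ∈ data, "patient_id" ∈ r.map Prod.fst ∧ "ground_truth" ∈ r.map Prod.fst ∧
    "prediction" ∈ r.map Prod.fst

instance (data : List (List (String × Int))) : Decidable (Pre_aggregate_to_patient_level data) := by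
  unfold Pre_aggregate_to_patient_level; infer_instance

def pvWitness_aggregate_to_patient_level : (List (List (String × Int))) :=
  [[("patient_id", 1), ("ground_truth", 0), ("prediction", 1)],
   [("patient_id", 1), ("ground_truth", 1), ("prediction", 0)],
   [("patient_id", 2), ("ground_truth", 0), ("prediction", 0)]]

def Spec_aggregate_to_patient_level (data : List (List (String × Int))) (out : List (List (String × Int))) : Prop := out = aggregate_to_patient_level_alt data
instance (data : List (List (String × Int))) (out : List (List (String × Int))) : Decidable (Spec_aggregate_to_patient_level data out) := by unfold Spec_aggregate_to_patient_level; infer_instance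

-- ===== CLAIM (what is proved, stated in full; the proofs are below) =====
def Claim_equal_aggregate_to_patient_level : Prop := ∀ (data : List (List (String × Int))), Dom_aggregate_to_patient_level data → Pre_aggregate_to_patient_level data → Spec_aggregate_to_patient_level data (aggregate_to_patient_level data)

-- ===== LEMMAS AND PROOFS =====

def pvRecOf (pid : Int) (gts preds : List Int) : PySem.Dict String Int :=
  ((PySem.Dict.empty.insert "patient_id" pid).insert "ground_truth" (pvMaxList gts)).insert
    "prediction" (pvMaxList preds)

-- invariant relating A's running aggregate to B's group-by dict
def pvInv (agg : PySem.Dict Int (PySem.Dict String Int))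
    (groups : PySem.Dict Int (List Int × List Int)) : Prop :=
  agg.keys = groups.keys ∧ groups.keys.Nodup ∧
  ∀ pid gts preds, groups.get? pid = some (gts, preds) →
    gts ≠ [] ∧ preds ≠ [] ∧ agg.get? pid = some (pvRecOf pid gts preds)

theorem pv_get?_of_contains {κ ν : Type} [BEq κ] [LawfulBEq κ] (d : PySem.Dict κ ν) (k : κ)
    (d0 : ν) (h : d.contains k = true) : d.get? k = some (d.getD k d0) := by
  cases hk : d.get? k with
  | none => rw [PySem.Dict.get?_eq_none_iff_contains] at hk; rw [hk] at h; cases h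
  | some v => rw [PySem.Dict.getD_of_get?_eq_some d d0 hk]

theorem pv_contains_of_get?_eq_some {κ ν : Type} [BEq κ] [LawfulBEq κ] (d : PySem.Dict κ ν)
    {k : κ} {v : ν} (h : d.get? k = some v) : d.contains k = true := by
  cases hc : d.contains k
  · rw [← PySem.Dict.get?_eq_none_iff_contains] at hc; rw [hc] at h; cases h
  · rfl

theorem pvMaxList_append (l : List Int) (x : Int) (h : l ≠ []) :
    pvMaxList (l ++ [x]) = max (pvMaxList l) x := by
  cases l with
  | nil => exact absurd rfl h
  | cons a t => simp [pvMaxList, List.foldl_append]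

theorem pv_items_empty {κ ν : Type} [BEq κ] : (PySem.Dict.empty : PySem.Dict κ ν).items = [] := rfl

theorem pvRecOf_items (pid : Int) (g p : List Int) :
    (pvRecOf pid g p).items =
      [("patient_id", pid), ("ground_truth", pvMaxList g), ("prediction", pvMaxList p)] := by
  simp [pvRecOf, PySem.Dict.items_insert_of_not_contains, PySem.Dict.contains_insert,
    PySem.Dict.contains_empty, pv_items_empty]

-- overwriting 'ground_truth' in A's record keeps the key order (Python overwrite-in-place)
theorem pv_reinsert_gt (pid X Y X' : Int) :
    ((((PySem.Dict.empty.insert "patient_id" pid).insert "ground_truth" X).insert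
        "prediction" Y).insert "ground_truth" X') =
      (((PySem.Dict.empty.insert "patient_id" pid).insert "ground_truth" X').insert
        "prediction" Y) := by
  apply PySem.Dict.ext
  simp [PySem.Dict.items_insert, PySem.Dict.contains_insert, PySem.Dict.contains_empty,
    pv_items_empty]

-- A's two in-place max updates turn the record for (gts, preds) into the record for the
-- extended groups (gts ++ [g], preds ++ [p])
theorem pvRecOf_step (pid g p : Int) (gts preds : List Int) (hg : gts ≠ []) (hp : preds ≠ []) :
    (((pvRecOf pid gts preds).insert "ground_truth"
        (max ((pvRecOf pid gts preds).getD "ground_truth" 0) g)).insert "prediction"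
      (max (((pvRecOf pid gts preds).insert "ground_truth"
        (max ((pvRecOf pid gts preds).getD "ground_truth" 0) g)).getD "prediction" 0) p)) =
      pvRecOf pid (gts ++ [g]) (preds ++ [p]) := by
  have h1 : (pvRecOf pid gts preds).getD "ground_truth" 0 = pvMaxList gts := by
    rw [pvRecOf, PySem.Dict.getD_insert]
    simp [PySem.Dict.getD_insert_self]
  simp only [h1]
  rw [pvRecOf, pv_reinsert_gt]
  rw [PySem.Dict.getD_insert_self, PySem.Dict.insert_insert_self]
  rw [pvRecOf, pvMaxList_append gts g hg, pvMaxList_append preds p hp]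

theorem pv_step (record : List (String × Int))
    (agg : PySem.Dict Int (PySem.Dict String Int))
    (groups : PySem.Dict Int (List Int × List Int)) (h : pvInv agg groups) :
    pvInv
      ((fun (agg : PySem.Dict Int (PySem.Dict String Int)) record =>
        let pid := (pvGetKey record "patient_id").getD 0
        if !(agg.contains pid) then
          agg.insert pid
            (((PySem.Dict.empty.insert "patient_id" pid).insert
                "ground_truth" ((pvGetKey record "ground_truth").getD 0)).insert
                "prediction" ((pvGetKey record "prediction").getD 0))
        else
          let agg := agg.modify pid PySem.Dict.empty
            (fun inner => inner.insert "ground_truth"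
              (max (inner.getD "ground_truth" 0) ((pvGetKey record "ground_truth").getD 0)))
          agg.modify pid PySem.Dict.empty
            (fun inner => inner.insert "prediction"
              (max (inner.getD "prediction" 0) ((pvGetKey record "prediction").getD 0)))) agg record)
      ((fun (groups : PySem.Dict Int (List Int × List Int)) record =>
        let pid := (pvGetKey record "patient_id").getD 0
        let groups := groups.setdefault pid ([], [])
        let cur := groups.getD pid ([], [])
        groups.insert pid
          (cur.1 ++ [(pvGetKey record "ground_truth").getD 0],
           cur.2 ++ [(pvGetKey record "prediction").getD 0])) groups record) := by
  obtain ⟨hk, hnd, hpt⟩ := h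
  beta_reduce
  simp only []
  set pid := (pvGetKey record "patient_id").getD 0 with hpid
  set g := (pvGetKey record "ground_truth").getD 0 with hgv
  set p := (pvGetKey record "prediction").getD 0 with hpv
  have hc : agg.contains pid = groups.contains pid := by
    cases hgc : groups.contains pid
    · cases hac : agg.contains pid
      · rfl
      · exfalso
        have := (PySem.Dict.contains_iff_mem_keys agg pid).mp hac
        rw [hk, ← PySem.Dict.contains_iff_mem_keys] at this
        rw [this] at hgc; cases hgc
    · rw [PySem.Dict.contains_iff_mem_keys, hk, ← PySem.Dict.contains_iff_mem_keys]
      exact hgc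
  cases hgc : groups.contains pid with
  | false =>
    have hac : agg.contains pid = false := by rw [hc, hgc]
    rw [if_pos (show (!agg.contains pid) = true by rw [hac]; rfl)]
    rw [PySem.Dict.setdefault_of_not_contains groups ([], []) hgc]
    rw [PySem.Dict.getD_insert_self, PySem.Dict.insert_insert_self]
    simp only [List.nil_append]
    have hnotmem : pid ∉ groups.keys := fun hm =>
      by rw [← PySem.Dict.contains_iff_mem_keys] at hm; rw [hm] at hgc; cases hgc
    refine ⟨?_, ?_, ?_⟩
    · rw [PySem.Dict.keys_insert_of_not_contains agg _ hac,
        PySem.Dict.keys_insert_of_not_contains groups _ hgc, hk]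
    · rw [PySem.Dict.keys_insert_of_not_contains groups _ hgc]
      simp [List.nodup_append, hnd]
      exact fun a ha he => hnotmem (he ▸ ha)
    · intro pid' gts' preds' hget'
      by_cases hpp : pid' = pid
      · subst hpp
        rw [PySem.Dict.get?_insert_self] at hget'
        injection hget' with hv
        obtain ⟨h1, h2⟩ := Prod.mk.inj hv
        subst h1; subst h2
        refine ⟨by simp, by simp, ?_⟩
        rw [PySem.Dict.get?_insert_self]
        rfl
      · rw [PySem.Dict.get?_insert_of_ne _ _ hpp] at hget'
        obtain ⟨h1, h2, h3⟩ := hpt pid' gts' preds' hget'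
        exact ⟨h1, h2, by rw [PySem.Dict.get?_insert_of_ne _ _ hpp]; exact h3⟩
  | true =>
    have hac : agg.contains pid = true := by rw [hc, hgc]
    obtain ⟨⟨gts, preds⟩, hgsome⟩ : ∃ v, groups.get? pid = some v := by
      cases hx : groups.get? pid with
      | none => rw [PySem.Dict.get?_eq_none_iff_contains] at hx; rw [hx] at hgc; cases hgc
      | some v => exact ⟨v, rfl⟩
    obtain ⟨hgne, hpne, hasome⟩ := hpt pid gts preds hgsome
    have hgetD : groups.getD pid ([], []) = (gts, preds) :=
      PySem.Dict.getD_of_get?_eq_some groups ([], []) hgsome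
    rw [if_neg (show ¬((!agg.contains pid) = true) by rw [hac]; simp)]
    rw [PySem.Dict.setdefault_of_contains groups ([], []) hgc, hgetD]
    refine ⟨?_, ?_, ?_⟩
    · rw [PySem.Dict.keys_modify, PySem.Dict.keys_insert_of_contains]
      · rw [PySem.Dict.keys_modify, PySem.Dict.keys_insert_of_contains _ _ hac,
          PySem.Dict.keys_insert_of_contains _ _ hgc, hk]
      · rw [PySem.Dict.contains_modify]; simp
    · rw [PySem.Dict.keys_insert_of_contains _ _ hgc]; exact hnd
    · intro pid' gts' preds' hget'
      by_cases hpp : pid' = pid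
      · subst hpp
        rw [PySem.Dict.get?_insert_self] at hget'
        injection hget' with hv
        obtain ⟨h1, h2⟩ := Prod.mk.inj hv
        subst h1; subst h2
        refine ⟨by simp, by simp, ?_⟩
        have hc2 : ((agg.modify pid PySem.Dict.empty
            (fun inner => inner.insert "ground_truth"
              (max (inner.getD "ground_truth" 0) g))).modify pid PySem.Dict.empty
            (fun inner => inner.insert "prediction"
              (max (inner.getD "prediction" 0) p))).contains pid = true := by
          rw [PySem.Dict.contains_modify]; simp
        rw [pv_get?_of_contains _ _ PySem.Dict.empty hc2,
          PySem.Dict.getD_modify_self, PySem.Dict.getD_modify_self,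
          PySem.Dict.getD_of_get?_eq_some agg PySem.Dict.empty hasome]
        exact congrArg some (pvRecOf_step pid g p gts preds hgne hpne)
      · rw [PySem.Dict.get?_insert_of_ne _ _ hpp] at hget'
        obtain ⟨h1, h2, h3⟩ := hpt pid' gts' preds' hget'
        refine ⟨h1, h2, ?_⟩
        have hac' : agg.contains pid' = true := pv_contains_of_get?_eq_some agg h3
        have hc2 : ((agg.modify pid PySem.Dict.empty
            (fun inner => inner.insert "ground_truth"
              (max (inner.getD "ground_truth" 0) g))).modify pid PySem.Dict.empty
            (fun inner => inner.insert "prediction"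
              (max (inner.getD "prediction" 0) p))).contains pid' = true := by
          rw [PySem.Dict.contains_modify, PySem.Dict.contains_modify, hac']; simp
        rw [pv_get?_of_contains _ _ PySem.Dict.empty hc2,
          PySem.Dict.getD_modify_of_ne _ _ _ hpp, PySem.Dict.getD_modify_of_ne _ _ _ hpp,
          PySem.Dict.getD_of_get?_eq_some agg PySem.Dict.empty h3]

theorem pv_fold (data : List (List (String × Int)))
    (agg : PySem.Dict Int (PySem.Dict String Int))
    (groups : PySem.Dict Int (List Int × List Int)) (h : pvInv agg groups) :
    pvInv
      (data.foldl (fun (agg : PySem.Dict Int (PySem.Dict String Int)) record =>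
        let pid := (pvGetKey record "patient_id").getD 0
        if !(agg.contains pid) then
          agg.insert pid
            (((PySem.Dict.empty.insert "patient_id" pid).insert
                "ground_truth" ((pvGetKey record "ground_truth").getD 0)).insert
                "prediction" ((pvGetKey record "prediction").getD 0))
        else
          let agg := agg.modify pid PySem.Dict.empty
            (fun inner => inner.insert "ground_truth"
              (max (inner.getD "ground_truth" 0) ((pvGetKey record "ground_truth").getD 0)))
          agg.modify pid PySem.Dict.empty
            (fun inner => inner.insert "prediction"
              (max (inner.getD "prediction" 0) ((pvGetKey record "prediction").getD 0)))) agg)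
      (data.foldl (fun (groups : PySem.Dict Int (List Int × List Int)) record =>
        let pid := (pvGetKey record "patient_id").getD 0
        let groups := groups.setdefault pid ([], [])
        let cur := groups.getD pid ([], [])
        groups.insert pid
          (cur.1 ++ [(pvGetKey record "ground_truth").getD 0],
           cur.2 ++ [(pvGetKey record "prediction").getD 0])) groups) := by
  induction data generalizing agg groups with
  | nil => exact h
  | cons r t ih => exact ih _ _ (pv_step r agg groups h)

theorem pv_final (agg : PySem.Dict Int (PySem.Dict String Int))
    (groups : PySem.Dict Int (List Int × List Int)) (h : pvInv agg groups) :
    agg.values.map (fun d => d.items) =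
      groups.items.map (fun p =>
        [("patient_id", p.1), ("ground_truth", pvMaxList p.2.1),
         ("prediction", pvMaxList p.2.2)]) := by
  obtain ⟨hk, hnd, hpt⟩ := h
  have hnda : agg.keys.Nodup := hk ▸ hnd
  rw [PySem.Dict.values_eq_map_keys agg hnda PySem.Dict.empty,
    PySem.Dict.items_eq_map_keys groups hnd ([], []), hk, List.map_map, List.map_map]
  apply List.map_congr_left
  intro k hkmem
  obtain ⟨⟨gts, preds⟩, hgk⟩ : ∃ v, groups.get? k = some v := by
    cases hx : groups.get? k with
    | none => rw [PySem.Dict.get?_eq_none_iff_not_mem_keys] at hx; exact absurd hkmem hx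
    | some v => exact ⟨v, rfl⟩
  obtain ⟨_, _, hak⟩ := hpt k gts preds hgk
  simp only [Function.comp]
  rw [PySem.Dict.getD_of_get?_eq_some agg PySem.Dict.empty hak,
    PySem.Dict.getD_of_get?_eq_some groups ([], []) hgk, pvRecOf_items]

theorem pvInv_empty : pvInv PySem.Dict.empty PySem.Dict.empty := by
  refine ⟨by rw [PySem.Dict.keys_empty, PySem.Dict.keys_empty], by rw [PySem.Dict.keys_empty]; exact List.nodup_nil, ?_⟩
  intro pid gts preds hget
  rw [PySem.Dict.get?_empty] at hget
  cases hget

theorem aggregate_to_patient_level_equal (data : List (List (String × Int))) :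
    aggregate_to_patient_level data = aggregate_to_patient_level_alt data := by
  unfold aggregate_to_patient_level aggregate_to_patient_level_alt
  exact pv_final _ _ (pv_fold data _ _ pvInv_empty)

-- ===== VERDICT (by name: the statement is the Claim_ definition above) =====
theorem aggregate_to_patient_level_spec : Claim_equal_aggregate_to_patient_level := by
  intro data _ _
  unfold Spec_aggregate_to_patient_level
  exact aggregate_to_patient_level_equal data
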